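-- pv_equiv track=rewrite | github.com/hwchoi96/coding_test | green_velt.py | get_score_not_dup
-- ===== SOURCE A (Python) =====
-- from itertools import combinations
--
-- def get_score_not_dup(cards):
--     # 번호도 카드도 겹치지 않는 카드의 개수 세기
--     num_not_dup = []
--     alpha_not_dup = []
--     score = 0
--
--     for card in cards:
--         if card[0] not in alpha_not_dup:
--             alpha_not_dup.append(card[0])
--         if card[1] not in num_not_dup:
--             num_not_dup.append(card[1])
--
--     if len(alpha_not_dup) >= 3 and len(alpha_not_dup) == len(num_not_dup):
--         dummy = [i for i in range(len(alpha_not_dup))]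
--
--         for i in range(3, len(dummy) + 1):
--             com = list(combinations(dummy, i))
--             for c in com:
--                 score += (len(c) ** 2)
--
--     return score
-- ===== SOURCE B (Python) =====
-- def get_score_not_dup(cards):
--     n = len({card[0] for card in cards})
--     if n < 3 or n != len({card[1] for card in cards}):
--         return 0
--     score = 0
--     c = 1  # running binomial coefficient C(n, i)
--     for i in range(1, n + 1):
--         c = c * (n - i + 1) // i
--         if i >= 3:
--             score += c * i * i
--     return score
-- ===== Notes on version B (the rewrite author's own statement) =====
-- stated objective: alternative
-- what changed: Instead of materialising every size-i combination of range(n) and adding i^2 per tuple (exponential in the distinct-letter count n), B counts distinct letters/numbers with sets and accumulates C(n,i)*i^2 in one O(n) loop that updates the binomial coefficient incrementally.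
import Mathlib
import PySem

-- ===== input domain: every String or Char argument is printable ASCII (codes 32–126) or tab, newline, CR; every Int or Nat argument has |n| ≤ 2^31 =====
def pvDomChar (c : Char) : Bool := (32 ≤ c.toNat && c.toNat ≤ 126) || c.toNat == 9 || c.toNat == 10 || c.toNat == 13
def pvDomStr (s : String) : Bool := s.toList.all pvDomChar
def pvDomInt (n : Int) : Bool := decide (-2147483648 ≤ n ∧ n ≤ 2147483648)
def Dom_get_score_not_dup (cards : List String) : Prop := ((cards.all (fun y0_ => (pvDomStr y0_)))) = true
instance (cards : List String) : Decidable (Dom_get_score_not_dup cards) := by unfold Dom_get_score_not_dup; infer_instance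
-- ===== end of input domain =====

-- B replaces A's enumeration of all size-i combinations by a single loop over i
-- accumulating C(n,i)*i^2 with an incrementally updated binomial coefficient (objective: alternative).

-- ===== PORT A =====
def get_score_not_dup (cards : List String) : Int :=
  let st : List Char × List Char := cards.foldl (fun st card =>
      let alpha := if st.1.contains ((PySem.Str.pyGet? card 0).getD ' ') then st.1
                   else st.1 ++ [(PySem.Str.pyGet? card 0).getD ' ']
      let num := if st.2.contains ((PySem.Str.pyGet? card 1).getD ' ') then st.2
                 else st.2 ++ [(PySem.Str.pyGet? card 1).getD ' ']
      (alpha, num)) ([], [])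
  if 3 ≤ st.1.length ∧ st.1.length = st.2.length then
    let dummy := PySem.List.pyRange 0 (st.1.length : Int) 1
    (PySem.List.pyRange 3 ((dummy.length : Int) + 1) 1).foldl (fun score i =>
      (List.sublistsLen i.toNat dummy).foldl (fun s c => s + ((c.length : Int)) ^ 2) score) 0
  else 0

-- ===== PORT B =====
def get_score_not_dup_alt (cards : List String) : Int :=
  let n : Int := ((PySem.Set.ofList (cards.map fun card => (PySem.Str.pyGet? card 0).getD ' ')).length : Int)
  if n < 3 ∨ n ≠ ((PySem.Set.ofList (cards.map fun card => (PySem.Str.pyGet? card 1).getD ' ')).length : Int) then 0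
  else
    ((PySem.List.pyRange 1 (n + 1) 1).foldl (fun (st : Int × Int) i =>
        let c := PySem.Int.floordiv (st.1 * (n - i + 1)) i
        (c, if 3 ≤ i then st.2 + c * i * i else st.2)) (1, 0)).2

-- ===== PRECONDITION & SPEC =====
-- Pre_ excludes only inputs on which the Python A raises IndexError: some card with fewer
-- than 2 characters (card[0]/card[1] out of range).
def Pre_get_score_not_dup (cards : List String) : Prop := ∀ card ∈ cards, 2 ≤ card.toList.length
instance (cards : List String) : Decidable (Pre_get_score_not_dup cards) := by unfold Pre_get_score_not_dup; infer_instance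
def pvWitness_get_score_not_dup : List String := ["A1", "B2", "C3"]
def Spec_get_score_not_dup (cards : List String) (out : Int) : Prop := out = get_score_not_dup_alt cards
instance (cards : List String) (out : Int) : Decidable (Spec_get_score_not_dup cards out) := by unfold Spec_get_score_not_dup; infer_instance

-- ===== CLAIM (what is proved, stated in full; the proofs are below) =====
def Claim_equal_get_score_not_dup : Prop := ∀ (cards : List String), Dom_get_score_not_dup cards → Pre_get_score_not_dup cards → Spec_get_score_not_dup cards (get_score_not_dup cards)

-- ===== LEMMAS AND PROOFS =====

-- A's simultaneous in-order dedup of the two character streams is the pair of sets B builds.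
lemma pairfold_sets (cards : List String) (a b : List Char) :
    cards.foldl (fun (st : List Char × List Char) card =>
        ((if st.1.contains ((PySem.Str.pyGet? card 0).getD ' ') then st.1
          else st.1 ++ [(PySem.Str.pyGet? card 0).getD ' ']),
         (if st.2.contains ((PySem.Str.pyGet? card 1).getD ' ') then st.2
          else st.2 ++ [(PySem.Str.pyGet? card 1).getD ' ']))) (a, b)
      = ((cards.map fun c => (PySem.Str.pyGet? c 0).getD ' ').foldl PySem.Set.add a,
         (cards.map fun c => (PySem.Str.pyGet? c 1).getD ' ').foldl PySem.Set.add b) := by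
  induction cards generalizing a b with
  | nil => rfl
  | cons card rest ih =>
      simp only [List.foldl_cons, List.map_cons]
      rw [ih]
      rfl

-- summing len(c)**2 over a list whose members all have length k
lemma foldl_sq_len (L : List (List Int)) (k : ℕ) (s : Int)
    (h : ∀ c ∈ L, c.length = k) :
    L.foldl (fun s c => s + ((c.length : Int)) ^ 2) s = s + (L.length : Int) * (k : Int) ^ 2 := by
  induction L generalizing s with
  | nil => simp
  | cons c cs ih =>
      simp only [List.foldl_cons]
      rw [ih _ (fun c hc => h c (by simp [hc])), h c (by simp)]
      simp only [List.length_cons]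
      push_cast
      ring

-- the joint invariant of A's combination loop and B's binomial loop
lemma loop_eq (n : ℕ) : ∀ m : ℕ, m ≤ n →
    (PySem.List.pyRange 1 ((m : Int) + 1) 1).foldl (fun (st : Int × Int) i =>
        (PySem.Int.floordiv (st.1 * ((n : Int) - i + 1)) i,
         if 3 ≤ i then st.2 + PySem.Int.floordiv (st.1 * ((n : Int) - i + 1)) i * i * i else st.2)) (1, 0)
      = (((n.choose m : ℕ) : Int),
         (PySem.List.pyRange 3 ((m : Int) + 1) 1).foldl (fun score i =>
            (List.sublistsLen i.toNat (PySem.List.pyRange 0 (n : Int) 1)).foldl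
              (fun s c => s + ((c.length : Int)) ^ 2) score) 0) := by
  intro m
  induction m with
  | zero =>
      intro _
      rw [show PySem.List.pyRange 1 (((0 : ℕ) : Int) + 1) 1 = [] from
            PySem.List.pyRange_one_eq_nil (by norm_num),
          show PySem.List.pyRange 3 (((0 : ℕ) : Int) + 1) 1 = [] from
            PySem.List.pyRange_one_eq_nil (by norm_num)]
      norm_num
  | succ m ih =>
      intro hm
      have hmn : m ≤ n := Nat.le_of_succ_le hm
      have hcast : ((m + 1 : ℕ) : Int) + 1 = ((m : Int) + 1) + 1 := by push_cast; ring
      rw [hcast,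
          show PySem.List.pyRange 1 (((m : Int) + 1) + 1) 1
              = PySem.List.pyRange 1 ((m : Int) + 1) 1 ++ [(m : Int) + 1] from
            PySem.List.pyRange_one_succ_right (by omega)]
      rw [List.foldl_append, ih hmn]
      have key : ((n.choose m : ℕ) : Int) * ((n : Int) - ((m : Int) + 1) + 1)
          = ((n.choose (m + 1) : ℕ) : Int) * ((m : Int) + 1) := by
        have h := Nat.choose_succ_right_eq n m
        zify [hmn] at h
        have hr : (n : Int) - ((m : Int) + 1) + 1 = (n : Int) - (m : Int) := by ring
        rw [hr]
        linarith [h]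
      have hc : PySem.Int.floordiv (((n.choose m : ℕ) : Int) * ((n : Int) - ((m : Int) + 1) + 1)) ((m : Int) + 1)
          = ((n.choose (m + 1) : ℕ) : Int) := by
        rw [key]
        simp only [PySem.Int.floordiv]
        exact Int.mul_fdiv_cancel _ (by positivity)
      have hsub : ∀ c ∈ List.sublistsLen (((m : Int) + 1).toNat) (PySem.List.pyRange 0 (n : Int) 1),
          c.length = m + 1 := by
        intro c hc
        have := (List.mem_sublistsLen.mp hc).2
        omega
      by_cases h3m : (3 : Int) ≤ (m : Int) + 1
      · simp only [List.foldl_cons, List.foldl_nil, hc, if_pos h3m]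
        rw [show PySem.List.pyRange 3 (((m : Int) + 1) + 1) 1
              = PySem.List.pyRange 3 ((m : Int) + 1) 1 ++ [(m : Int) + 1] from
            PySem.List.pyRange_one_succ_right (by omega)]
        rw [List.foldl_append]
        simp only [List.foldl_cons, List.foldl_nil]
        rw [foldl_sq_len _ (m + 1) _ hsub, List.length_sublistsLen,
            show (PySem.List.pyRange 0 (n : Int) 1).length = n by
              rw [PySem.List.length_pyRange_one]; omega,
            show ((m : Int) + 1).toNat = m + 1 by omega]
        congr 1
        push_cast
        ring
      · simp only [List.foldl_cons, List.foldl_nil, hc, if_neg h3m]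
        rw [show PySem.List.pyRange 3 (((m : Int) + 1) + 1) 1 = [] from
              PySem.List.pyRange_one_eq_nil (by omega),
            show PySem.List.pyRange 3 ((m : Int) + 1) 1 = [] from
              PySem.List.pyRange_one_eq_nil (by omega)]

-- ===== VERDICT (by name: the statement is the Claim_ definition above) =====
theorem get_score_not_dup_spec : Claim_equal_get_score_not_dup := by
  intro cards _ _
  unfold Spec_get_score_not_dup get_score_not_dup get_score_not_dup_alt
  rw [pairfold_sets]
  dsimp only
  set L1 := (cards.map fun c => (PySem.Str.pyGet? c 0).getD ' ').foldl PySem.Set.add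
    ([] : List Char) with hL1
  set L2 := (cards.map fun c => (PySem.Str.pyGet? c 1).getD ' ').foldl PySem.Set.add
    ([] : List Char) with hL2
  have hOf1 : PySem.Set.ofList (cards.map fun card => (PySem.Str.pyGet? card 0).getD ' ') = L1 := rfl
  have hOf2 : PySem.Set.ofList (cards.map fun card => (PySem.Str.pyGet? card 1).getD ' ') = L2 := rfl
  rw [hOf1, hOf2]
  by_cases hcond : 3 ≤ L1.length ∧ L1.length = L2.length
  · rw [if_pos hcond, if_neg (by omega)]
    rw [show (PySem.List.pyRange 0 (L1.length : Int) 1).length = L1.length by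
          rw [PySem.List.length_pyRange_one]; omega]
    rw [loop_eq L1.length L1.length le_rfl]
  · rw [if_neg hcond, if_pos (by omega)]
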